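-- pv_equiv track=rewrite | github.com/BellCordeiro/BellCordeiro | CriarNFT 3.py | tagboca
-- ===== SOURCE A (Python) =====
-- def tagboca(boca):
--     boca_cigarro = [1]
--     boca_gato = [2]
--     boca_palhaço = [3]
--     boca_3 = [4]
--     boca_smiley_1 =[5, 18, 19, 20, 21, 22, 23, 24, 25, 26, 27, 28, 29]
--     boca_sad = [6, 30, 31, 32, 33, 34, 35, 36, 37, 38, 39, 40, 41]
--     boca_o = [7, 42, 43, 44, 45, 46, 47, 48, 49, 50, 51, 52, 53]
--     boca_smiley_2 =[8, 54, 55, 56, 57, 58, 59, 60, 61, 62, 63, 64, 65]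
--     boca_smiley_3 = [9]
--     boca_sad_2 = [10]
--     boca_black1 = [11]
--     boca_dot = [12]
--     boca_moe = [13]
--     boca_P = [14]
--     boca_sad3 = [15]
--     boca_dot2 = [16]
--     boca_s =[17]
--     if(boca == '0'):
--             return ('mouth : none')
--     for bo in boca_cigarro:
--         if boca == str(bo):
--             return ('mouth : cigarette')
--     for bo in boca_gato:
--         if boca == str(bo):
--             return ('mouth : cat')
--     for bo in boca_palhaço:
--         if boca == str(bo):
--             return ('mouth : clown')
--     for bo in boca_3:
--         if boca == str(bo):
--             return ('mouth : kiss')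
--     for bo in boca_smiley_1:
--         if boca == str(bo):
--             return ('mouth : drooling')
--     for bo in boca_sad:
--         if boca == str(bo):
--             return ('mouth : shocked')
--     for bo in boca_o:
--         if boca == str(bo):
--             return ('mouth : whistling')
--     for bo in boca_smiley_2:
--         if boca == str(bo):
--             return ('mouth : happy')
--     for bo in boca_smiley_3:
--         if boca == str(bo):
--             return ('mouth : cheerful')
--     for bo in boca_sad_2:
--         if boca == str(bo):
--             return ('mouth : sad')
--     for bo in boca_black1:
--         if boca == str(bo):
--             return ('mouth : smile')
--     for bo in boca_3:
--         if boca == str(bo):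
--             return ('mouth : clown mouth')
--     for bo in boca_dot:
--         if boca == str(bo):
--             return ('mouth : loathing')
--     for bo in boca_moe:
--         if boca == str(bo):
--             return ('mouth : uwu')
--     for bo in boca_P:
--         if boca == str(bo):
--             return ('mouth : mocking')
--     for bo in boca_sad3:
--         if boca == str(bo):
--             return ('mouth : sad')
--     for bo in boca_dot2:
--         if boca == str(bo):
--             return ('mouth : thinking')
--     for bo in boca_s:
--         if boca == str(bo):
--             return ('mouth : shy')
--     return('mouth : Não catalogado')
-- ===== SOURCE B (Python) =====
-- _MOUTHS = {
--     '0': 'mouth : none',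
--     '1': 'mouth : cigarette',
--     '2': 'mouth : cat',
--     '3': 'mouth : clown',
--     '4': 'mouth : kiss',
--     '5': 'mouth : drooling',
--     '18': 'mouth : drooling',
--     '19': 'mouth : drooling',
--     '20': 'mouth : drooling',
--     '21': 'mouth : drooling',
--     '22': 'mouth : drooling',
--     '23': 'mouth : drooling',
--     '24': 'mouth : drooling',
--     '25': 'mouth : drooling',
--     '26': 'mouth : drooling',
--     '27': 'mouth : drooling',
--     '28': 'mouth : drooling',
--     '29': 'mouth : drooling',
--     '6': 'mouth : shocked',
--     '30': 'mouth : shocked',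
--     '31': 'mouth : shocked',
--     '32': 'mouth : shocked',
--     '33': 'mouth : shocked',
--     '34': 'mouth : shocked',
--     '35': 'mouth : shocked',
--     '36': 'mouth : shocked',
--     '37': 'mouth : shocked',
--     '38': 'mouth : shocked',
--     '39': 'mouth : shocked',
--     '40': 'mouth : shocked',
--     '41': 'mouth : shocked',
--     '7': 'mouth : whistling',
--     '42': 'mouth : whistling',
--     '43': 'mouth : whistling',
--     '44': 'mouth : whistling',
--     '45': 'mouth : whistling',
--     '46': 'mouth : whistling',
--     '47': 'mouth : whistling',
--     '48': 'mouth : whistling',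
--     '49': 'mouth : whistling',
--     '50': 'mouth : whistling',
--     '51': 'mouth : whistling',
--     '52': 'mouth : whistling',
--     '53': 'mouth : whistling',
--     '8': 'mouth : happy',
--     '54': 'mouth : happy',
--     '55': 'mouth : happy',
--     '56': 'mouth : happy',
--     '57': 'mouth : happy',
--     '58': 'mouth : happy',
--     '59': 'mouth : happy',
--     '60': 'mouth : happy',
--     '61': 'mouth : happy',
--     '62': 'mouth : happy',
--     '63': 'mouth : happy',
--     '64': 'mouth : happy',
--     '65': 'mouth : happy',
--     '9': 'mouth : cheerful',
--     '10': 'mouth : sad',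
--     '11': 'mouth : smile',
--     '12': 'mouth : loathing',
--     '13': 'mouth : uwu',
--     '14': 'mouth : mocking',
--     '15': 'mouth : sad',
--     '16': 'mouth : thinking',
--     '17': 'mouth : shy',
-- }
--
--
-- def tagboca(boca):
--     return _MOUTHS.get(boca, 'mouth : N\u00e3o catalogado')
-- ===== Notes on version B (the rewrite author's own statement) =====
-- stated objective: simpler
-- what changed: Replaced the 18 sequential scanning loops (each comparing boca against str() of every element of a hardcoded list, including a dead re-scan of one list under a second label) by one static string-keyed table built once and a single first-match lookup with a default.
import Mathlib
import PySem

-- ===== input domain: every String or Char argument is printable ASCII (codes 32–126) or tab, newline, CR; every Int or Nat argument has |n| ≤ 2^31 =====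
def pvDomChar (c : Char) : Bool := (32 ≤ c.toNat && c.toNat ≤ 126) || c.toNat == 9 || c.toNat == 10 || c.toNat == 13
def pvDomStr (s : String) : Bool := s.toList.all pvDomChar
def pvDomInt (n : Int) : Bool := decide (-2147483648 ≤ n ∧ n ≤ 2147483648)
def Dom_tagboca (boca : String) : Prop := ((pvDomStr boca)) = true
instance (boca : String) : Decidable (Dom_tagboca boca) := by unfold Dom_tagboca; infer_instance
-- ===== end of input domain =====

-- B replaces A's 18 sequential scan loops by a single static table lookup (simpler; same observable return value).

-- ===== PORT A =====
-- 'for bo in xs: if boca == str(bo): return <label>' — the loop matches iff some element's str equals boca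
def scanMatch (boca : String) (xs : List Int) : Bool :=
  xs.any (fun bo => boca == PySem.Int.toStr bo)

def tagboca (boca : String) : String :=
  if boca == "0" then "mouth : none"
  else if scanMatch boca ([1] : List Int) then "mouth : cigarette"
  else if scanMatch boca ([2] : List Int) then "mouth : cat"
  else if scanMatch boca ([3] : List Int) then "mouth : clown"
  else if scanMatch boca ([4] : List Int) then "mouth : kiss"
  else if scanMatch boca ([5, 18, 19, 20, 21, 22, 23, 24, 25, 26, 27, 28, 29] : List Int) then "mouth : drooling"
  else if scanMatch boca ([6, 30, 31, 32, 33, 34, 35, 36, 37, 38, 39, 40, 41] : List Int) then "mouth : shocked"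
  else if scanMatch boca ([7, 42, 43, 44, 45, 46, 47, 48, 49, 50, 51, 52, 53] : List Int) then "mouth : whistling"
  else if scanMatch boca ([8, 54, 55, 56, 57, 58, 59, 60, 61, 62, 63, 64, 65] : List Int) then "mouth : happy"
  else if scanMatch boca ([9] : List Int) then "mouth : cheerful"
  else if scanMatch boca ([10] : List Int) then "mouth : sad"
  else if scanMatch boca ([11] : List Int) then "mouth : smile"
  else if scanMatch boca ([4] : List Int) then "mouth : clown mouth"
  else if scanMatch boca ([12] : List Int) then "mouth : loathing"
  else if scanMatch boca ([13] : List Int) then "mouth : uwu"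
  else if scanMatch boca ([14] : List Int) then "mouth : mocking"
  else if scanMatch boca ([15] : List Int) then "mouth : sad"
  else if scanMatch boca ([16] : List Int) then "mouth : thinking"
  else if scanMatch boca ([17] : List Int) then "mouth : shy"
  else "mouth : Não catalogado"

-- ===== PORT B =====
def mouthTable : List (String × String) :=
  [("0", "mouth : none"),
   ("1", "mouth : cigarette"),
   ("2", "mouth : cat"),
   ("3", "mouth : clown"),
   ("4", "mouth : kiss"),
   ("5", "mouth : drooling"),
   ("18", "mouth : drooling"),
   ("19", "mouth : drooling"),
   ("20", "mouth : drooling"),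
   ("21", "mouth : drooling"),
   ("22", "mouth : drooling"),
   ("23", "mouth : drooling"),
   ("24", "mouth : drooling"),
   ("25", "mouth : drooling"),
   ("26", "mouth : drooling"),
   ("27", "mouth : drooling"),
   ("28", "mouth : drooling"),
   ("29", "mouth : drooling"),
   ("6", "mouth : shocked"),
   ("30", "mouth : shocked"),
   ("31", "mouth : shocked"),
   ("32", "mouth : shocked"),
   ("33", "mouth : shocked"),
   ("34", "mouth : shocked"),
   ("35", "mouth : shocked"),
   ("36", "mouth : shocked"),
   ("37", "mouth : shocked"),
   ("38", "mouth : shocked"),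
   ("39", "mouth : shocked"),
   ("40", "mouth : shocked"),
   ("41", "mouth : shocked"),
   ("7", "mouth : whistling"),
   ("42", "mouth : whistling"),
   ("43", "mouth : whistling"),
   ("44", "mouth : whistling"),
   ("45", "mouth : whistling"),
   ("46", "mouth : whistling"),
   ("47", "mouth : whistling"),
   ("48", "mouth : whistling"),
   ("49", "mouth : whistling"),
   ("50", "mouth : whistling"),
   ("51", "mouth : whistling"),
   ("52", "mouth : whistling"),
   ("53", "mouth : whistling"),
   ("8", "mouth : happy"),
   ("54", "mouth : happy"),
   ("55", "mouth : happy"),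
   ("56", "mouth : happy"),
   ("57", "mouth : happy"),
   ("58", "mouth : happy"),
   ("59", "mouth : happy"),
   ("60", "mouth : happy"),
   ("61", "mouth : happy"),
   ("62", "mouth : happy"),
   ("63", "mouth : happy"),
   ("64", "mouth : happy"),
   ("65", "mouth : happy"),
   ("9", "mouth : cheerful"),
   ("10", "mouth : sad"),
   ("11", "mouth : smile"),
   ("12", "mouth : loathing"),
   ("13", "mouth : uwu"),
   ("14", "mouth : mocking"),
   ("15", "mouth : sad"),
   ("16", "mouth : thinking"),
   ("17", "mouth : shy")]

-- dict.get(boca, default): first matching key wins (keys are distinct, so any order agrees)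
def lookupD : List (String × String) → String → String
  | [], _ => "mouth : Não catalogado"
  | (k, v) :: rest, boca => if boca == k then v else lookupD rest boca

def tagboca_alt (boca : String) : String :=
  lookupD mouthTable boca

-- ===== PRECONDITION & SPEC =====
def Spec_tagboca (boca : String) (out : String) : Prop := out = tagboca_alt boca
instance (boca : String) (out : String) : Decidable (Spec_tagboca boca out) := by unfold Spec_tagboca; infer_instance

-- ===== CLAIM (what is proved, stated in full; the proofs are below) =====
def Claim_equal_tagboca : Prop := ∀ (boca : String), Dom_tagboca boca → Spec_tagboca boca (tagboca boca)

-- ===== LEMMAS AND PROOFS =====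

-- ===== VERDICT (by name: the statement is the Claim_ definition above) =====
set_option maxHeartbeats 2000000 in
theorem tagboca_spec : Claim_equal_tagboca := by
  intro boca _
  unfold Spec_tagboca
  by_cases h0 : boca = "0"
  · subst h0; decide
  by_cases h1 : boca = "1"
  · subst h1; decide
  by_cases h2 : boca = "2"
  · subst h2; decide
  by_cases h3 : boca = "3"
  · subst h3; decide
  by_cases h4 : boca = "4"
  · subst h4; decide
  by_cases h5 : boca = "5"
  · subst h5; decide
  by_cases h18 : boca = "18"
  · subst h18; decide
  by_cases h19 : boca = "19"
  · subst h19; decide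
  by_cases h20 : boca = "20"
  · subst h20; decide
  by_cases h21 : boca = "21"
  · subst h21; decide
  by_cases h22 : boca = "22"
  · subst h22; decide
  by_cases h23 : boca = "23"
  · subst h23; decide
  by_cases h24 : boca = "24"
  · subst h24; decide
  by_cases h25 : boca = "25"
  · subst h25; decide
  by_cases h26 : boca = "26"
  · subst h26; decide
  by_cases h27 : boca = "27"
  · subst h27; decide
  by_cases h28 : boca = "28"
  · subst h28; decide
  by_cases h29 : boca = "29"
  · subst h29; decide
  by_cases h6 : boca = "6"
  · subst h6; decide
  by_cases h30 : boca = "30"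
  · subst h30; decide
  by_cases h31 : boca = "31"
  · subst h31; decide
  by_cases h32 : boca = "32"
  · subst h32; decide
  by_cases h33 : boca = "33"
  · subst h33; decide
  by_cases h34 : boca = "34"
  · subst h34; decide
  by_cases h35 : boca = "35"
  · subst h35; decide
  by_cases h36 : boca = "36"
  · subst h36; decide
  by_cases h37 : boca = "37"
  · subst h37; decide
  by_cases h38 : boca = "38"
  · subst h38; decide
  by_cases h39 : boca = "39"
  · subst h39; decide
  by_cases h40 : boca = "40"
  · subst h40; decide
  by_cases h41 : boca = "41"
  · subst h41; decide
  by_cases h7 : boca = "7"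
  · subst h7; decide
  by_cases h42 : boca = "42"
  · subst h42; decide
  by_cases h43 : boca = "43"
  · subst h43; decide
  by_cases h44 : boca = "44"
  · subst h44; decide
  by_cases h45 : boca = "45"
  · subst h45; decide
  by_cases h46 : boca = "46"
  · subst h46; decide
  by_cases h47 : boca = "47"
  · subst h47; decide
  by_cases h48 : boca = "48"
  · subst h48; decide
  by_cases h49 : boca = "49"
  · subst h49; decide
  by_cases h50 : boca = "50"
  · subst h50; decide
  by_cases h51 : boca = "51"
  · subst h51; decide
  by_cases h52 : boca = "52"
  · subst h52; decide
  by_cases h53 : boca = "53"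
  · subst h53; decide
  by_cases h8 : boca = "8"
  · subst h8; decide
  by_cases h54 : boca = "54"
  · subst h54; decide
  by_cases h55 : boca = "55"
  · subst h55; decide
  by_cases h56 : boca = "56"
  · subst h56; decide
  by_cases h57 : boca = "57"
  · subst h57; decide
  by_cases h58 : boca = "58"
  · subst h58; decide
  by_cases h59 : boca = "59"
  · subst h59; decide
  by_cases h60 : boca = "60"
  · subst h60; decide
  by_cases h61 : boca = "61"
  · subst h61; decide
  by_cases h62 : boca = "62"
  · subst h62; decide
  by_cases h63 : boca = "63"
  · subst h63; decide
  by_cases h64 : boca = "64"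
  · subst h64; decide
  by_cases h65 : boca = "65"
  · subst h65; decide
  by_cases h9 : boca = "9"
  · subst h9; decide
  by_cases h10 : boca = "10"
  · subst h10; decide
  by_cases h11 : boca = "11"
  · subst h11; decide
  by_cases h12 : boca = "12"
  · subst h12; decide
  by_cases h13 : boca = "13"
  · subst h13; decide
  by_cases h14 : boca = "14"
  · subst h14; decide
  by_cases h15 : boca = "15"
  · subst h15; decide
  by_cases h16 : boca = "16"
  · subst h16; decide
  by_cases h17 : boca = "17"
  · subst h17; decide
  have t1 : PySem.Int.toStr 1 = "1" := by decide
  have t2 : PySem.Int.toStr 2 = "2" := by decide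
  have t3 : PySem.Int.toStr 3 = "3" := by decide
  have t4 : PySem.Int.toStr 4 = "4" := by decide
  have t5 : PySem.Int.toStr 5 = "5" := by decide
  have t18 : PySem.Int.toStr 18 = "18" := by decide
  have t19 : PySem.Int.toStr 19 = "19" := by decide
  have t20 : PySem.Int.toStr 20 = "20" := by decide
  have t21 : PySem.Int.toStr 21 = "21" := by decide
  have t22 : PySem.Int.toStr 22 = "22" := by decide
  have t23 : PySem.Int.toStr 23 = "23" := by decide
  have t24 : PySem.Int.toStr 24 = "24" := by decide
  have t25 : PySem.Int.toStr 25 = "25" := by decide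
  have t26 : PySem.Int.toStr 26 = "26" := by decide
  have t27 : PySem.Int.toStr 27 = "27" := by decide
  have t28 : PySem.Int.toStr 28 = "28" := by decide
  have t29 : PySem.Int.toStr 29 = "29" := by decide
  have t6 : PySem.Int.toStr 6 = "6" := by decide
  have t30 : PySem.Int.toStr 30 = "30" := by decide
  have t31 : PySem.Int.toStr 31 = "31" := by decide
  have t32 : PySem.Int.toStr 32 = "32" := by decide
  have t33 : PySem.Int.toStr 33 = "33" := by decide
  have t34 : PySem.Int.toStr 34 = "34" := by decide
  have t35 : PySem.Int.toStr 35 = "35" := by decide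
  have t36 : PySem.Int.toStr 36 = "36" := by decide
  have t37 : PySem.Int.toStr 37 = "37" := by decide
  have t38 : PySem.Int.toStr 38 = "38" := by decide
  have t39 : PySem.Int.toStr 39 = "39" := by decide
  have t40 : PySem.Int.toStr 40 = "40" := by decide
  have t41 : PySem.Int.toStr 41 = "41" := by decide
  have t7 : PySem.Int.toStr 7 = "7" := by decide
  have t42 : PySem.Int.toStr 42 = "42" := by decide
  have t43 : PySem.Int.toStr 43 = "43" := by decide
  have t44 : PySem.Int.toStr 44 = "44" := by decide
  have t45 : PySem.Int.toStr 45 = "45" := by decide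
  have t46 : PySem.Int.toStr 46 = "46" := by decide
  have t47 : PySem.Int.toStr 47 = "47" := by decide
  have t48 : PySem.Int.toStr 48 = "48" := by decide
  have t49 : PySem.Int.toStr 49 = "49" := by decide
  have t50 : PySem.Int.toStr 50 = "50" := by decide
  have t51 : PySem.Int.toStr 51 = "51" := by decide
  have t52 : PySem.Int.toStr 52 = "52" := by decide
  have t53 : PySem.Int.toStr 53 = "53" := by decide
  have t8 : PySem.Int.toStr 8 = "8" := by decide
  have t54 : PySem.Int.toStr 54 = "54" := by decide
  have t55 : PySem.Int.toStr 55 = "55" := by decide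
  have t56 : PySem.Int.toStr 56 = "56" := by decide
  have t57 : PySem.Int.toStr 57 = "57" := by decide
  have t58 : PySem.Int.toStr 58 = "58" := by decide
  have t59 : PySem.Int.toStr 59 = "59" := by decide
  have t60 : PySem.Int.toStr 60 = "60" := by decide
  have t61 : PySem.Int.toStr 61 = "61" := by decide
  have t62 : PySem.Int.toStr 62 = "62" := by decide
  have t63 : PySem.Int.toStr 63 = "63" := by decide
  have t64 : PySem.Int.toStr 64 = "64" := by decide
  have t65 : PySem.Int.toStr 65 = "65" := by decide
  have t9 : PySem.Int.toStr 9 = "9" := by decide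
  have t10 : PySem.Int.toStr 10 = "10" := by decide
  have t11 : PySem.Int.toStr 11 = "11" := by decide
  have t12 : PySem.Int.toStr 12 = "12" := by decide
  have t13 : PySem.Int.toStr 13 = "13" := by decide
  have t14 : PySem.Int.toStr 14 = "14" := by decide
  have t15 : PySem.Int.toStr 15 = "15" := by decide
  have t16 : PySem.Int.toStr 16 = "16" := by decide
  have t17 : PySem.Int.toStr 17 = "17" := by decide
  simp only [tagboca, tagboca_alt, scanMatch, mouthTable, lookupD,
    List.any_cons, List.any_nil, Bool.or_false, t1, t2, t3, t4, t5, t18, t19, t20, t21, t22, t23, t24, t25, t26, t27, t28, t29, t6, t30, t31, t32, t33, t34, t35, t36, t37, t38, t39, t40, t41, t7, t42, t43, t44, t45, t46, t47, t48, t49, t50, t51, t52, t53, t8, t54, t55, t56, t57, t58, t59, t60, t61, t62, t63, t64, t65, t9, t10, t11, t12, t13, t14, t15, t16, t17]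
  simp [h0, h1, h2, h3, h4, h5, h18, h19, h20, h21, h22, h23, h24, h25, h26, h27, h28, h29, h6, h30, h31, h32, h33, h34, h35, h36, h37, h38, h39, h40, h41, h7, h42, h43, h44, h45, h46, h47, h48, h49, h50, h51, h52, h53, h8, h54, h55, h56, h57, h58, h59, h60, h61, h62, h63, h64, h65, h9, h10, h11, h12, h13, h14, h15, h16, h17]
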